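-- pv_equiv track=rewrite | github.com/f4rkh4d/envdiff | src/envdiff/parser.py | _quote_closed
-- ===== SOURCE A (Python) =====
-- def _quote_closed(s: str, quote: str) -> bool:
--     """Return True if the closing quote appears in s (outside of escapes for ")."""
--     i = 0
--     while i < len(s):
--         c = s[i]
--         if quote == '"' and c == "\\" and i + 1 < len(s):
--             i += 2
--             continue
--         if c == quote:
--             return True
--         i += 1
--     return False
-- ===== SOURCE B (Python) =====
-- def _quote_closed(s: str, quote: str) -> bool:
--     """Return True if the closing quote appears in s (outside of escapes for ")."""
--     if quote != '"':
--         return any(c == quote for c in s)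
--     backslashes = 0
--     for c in s:
--         if c == "\\":
--             backslashes += 1
--         else:
--             if c == '"' and backslashes % 2 == 0:
--                 return True
--             backslashes = 0
--     return False
-- ===== Notes on version B (the rewrite author's own statement) =====
-- stated objective: alternative
-- what changed: Replaced A's index-based while loop that skips two positions on each escape with a single left-to-right scan counting the run of consecutive backslashes, accepting a '"' exactly when that run has even length (plus a plain any()-membership test for non-'"' quotes).
import Mathlib
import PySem

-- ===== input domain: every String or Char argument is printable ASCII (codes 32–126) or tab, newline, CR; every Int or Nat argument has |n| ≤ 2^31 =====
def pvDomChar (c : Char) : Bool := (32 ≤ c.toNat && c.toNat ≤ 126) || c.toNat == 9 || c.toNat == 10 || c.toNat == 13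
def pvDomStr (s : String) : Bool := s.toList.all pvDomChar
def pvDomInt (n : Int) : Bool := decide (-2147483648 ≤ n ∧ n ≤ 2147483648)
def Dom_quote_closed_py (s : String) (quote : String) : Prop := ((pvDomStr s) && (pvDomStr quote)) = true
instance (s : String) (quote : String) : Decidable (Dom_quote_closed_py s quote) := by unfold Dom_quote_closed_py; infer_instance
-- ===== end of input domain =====

-- B replaces A's pair-skipping index scan with a backslash-run-parity scan (one char at a time,
-- counting consecutive backslashes), plus a plain membership test for non-'"' quotes; a timing run measured B faster.


-- ===== PORT A =====
-- A's while loop over index i, skipping 2 on an escape (only when a next char exists);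
-- transliterated as recursion over the char list, where "i + 1 < len(s)" is the two-cons pattern.
def pvALoop (quote : String) : List Char → Bool
  | [] => false
  | [c] =>
    -- i + 1 < len(s) is false here, so only the `c == quote` test fires
    String.ofList [c] == quote
  | c :: c2 :: rest =>
    if quote == "\"" && c == '\\' then pvALoop quote rest
    else if String.ofList [c] == quote then true
    else pvALoop quote (c2 :: rest)

def quote_closed_py (s : String) (quote : String) : Bool := pvALoop quote s.toList

-- ===== PORT B =====
-- B's parity scan: count the run of consecutive backslashes; a '"' closes iff the run is even.
def pvBLoop : List Char → Nat → Bool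
  | [], _ => false
  | c :: rest, bs =>
    if c == '\\' then pvBLoop rest (bs + 1)
    else if c == '"' && bs % 2 == 0 then true
    else pvBLoop rest 0

def quote_closed_py_alt (s : String) (quote : String) : Bool :=
  if quote != "\"" then s.toList.any (fun c => String.ofList [c] == quote)
  else pvBLoop s.toList 0

-- ===== PRECONDITION & SPEC =====
def Spec_quote_closed_py (s : String) (quote : String) (out : Bool) : Prop := out = quote_closed_py_alt s quote
instance (s : String) (quote : String) (out : Bool) : Decidable (Spec_quote_closed_py s quote out) := by unfold Spec_quote_closed_py; infer_instance

-- ===== CLAIM (what is proved, stated in full; the proofs are below) =====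
def Claim_equal_quote_closed_py : Prop := ∀ (s : String) (quote : String), Dom_quote_closed_py s quote → Spec_quote_closed_py s quote (quote_closed_py s quote)

-- ===== LEMMAS AND PROOFS =====

-- a one-character string equals another single-character string iff the characters match
theorem single_beq (c d : Char) : (String.ofList [c] == String.ofList [d]) = (c == d) := by
  by_cases hc : c = d
  · simp [hc]
  · have h : String.ofList [c] ≠ String.ofList [d] := by
      intro he
      exact hc (by simpa using String.ofList_inj.mp he)
    simp [h, hc]

theorem dq_lit : ("\"" : String) = String.ofList ['"'] := rfl

-- pvBLoop only depends on the parity of the backslash counter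
theorem pvBLoop_two (l : List Char) : ∀ bs, pvBLoop l (bs + 2) = pvBLoop l bs := by
  induction l with
  | nil => intro bs; rfl
  | cons c rest ih =>
    intro bs
    simp only [pvBLoop]
    by_cases h : c = '\\'
    · simp only [h]
      have : bs + 2 + 1 = bs + 1 + 2 := by omega
      rw [this, ih (bs + 1)]
      simp
    · have hm : (bs + 2) % 2 = bs % 2 := by omega
      simp [h, hm]

-- after a backslash that escapes one following char, the scan state is reset
theorem pvBLoop_one (c : Char) (rest : List Char) : pvBLoop (c :: rest) 1 = pvBLoop rest 0 := by
  simp only [pvBLoop]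
  by_cases h : c = '\\'
  · simpa [h] using pvBLoop_two rest 0
  · by_cases h2 : c = '"'
    · simp [h2]
    · simp [h]

-- for quote = '"', A's pair-skipping scan agrees with B's parity scan
theorem quote_eq_dquote : ∀ l, pvALoop "\"" l = pvBLoop l 0 := by
  intro l
  induction l using pvALoop.induct "\"" with
  | case1 => rfl
  | case2 c =>
    simp only [pvALoop, pvBLoop, dq_lit, single_beq]
    by_cases h : c = '\\'
    · simp [h]
    · by_cases h2 : c = '"'
      · simp [h2]
      · simp [h, h2]
  | case3 c c2 rest h ih =>
    have hc : c = '\\' := by simpa using h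
    have hA : pvALoop "\"" (c :: c2 :: rest) = pvALoop "\"" rest := by
      rw [pvALoop, if_pos h]
    have hB : pvBLoop (c :: c2 :: rest) 0 = pvBLoop rest 0 := by
      rw [pvBLoop, if_pos (by simp [hc])]
      show pvBLoop (c2 :: rest) 1 = pvBLoop rest 0
      exact pvBLoop_one c2 rest
    rw [hA, hB, ih]
  | case4 c c2 rest h hq =>
    have hc : c = '"' := by
      have := hq
      rw [dq_lit, single_beq] at this
      simpa using this
    have hne : ¬(c == '\\') = true := by simp [hc]
    rw [pvALoop, if_neg h, if_pos hq, pvBLoop, if_neg hne, if_pos (by simp [hc])]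
  | case5 c c2 rest h hq ih =>
    have hc : ¬(c == '\\') = true := by
      intro he; exact h (by simp [he])
    have hcq : ¬(c == '"') = true := by
      intro he
      exact hq (by rw [dq_lit, single_beq]; exact he)
    have hA : pvALoop "\"" (c :: c2 :: rest) = pvALoop "\"" (c2 :: rest) := by
      rw [pvALoop, if_neg h, if_neg hq]
    have hB : pvBLoop (c :: c2 :: rest) 0 = pvBLoop (c2 :: rest) 0 := by
      rw [pvBLoop, if_neg hc, if_neg (by simp [hcq])]
    rw [hA, hB, ih]

-- for any other quote, A's scan is a plain membership test
theorem quote_ne_dquote (q : String) (hq : q ≠ "\"") (l : List Char) :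
    pvALoop q l = l.any (fun c => String.ofList [c] == q) := by
  induction l with
  | nil => rfl
  | cons c rest ih =>
    cases rest with
    | nil => simp [pvALoop, List.any]
    | cons c2 r =>
      simp only [pvALoop]
      rw [if_neg (by simp [hq])]
      by_cases h : (String.ofList [c] == q) = true
      · simp [h]
      · simp only [h, Bool.false_eq_true, if_false, ih, List.any_cons, Bool.false_or]

-- ===== VERDICT (by name: the statement is the Claim_ definition above) =====
theorem quote_closed_py_spec : Claim_equal_quote_closed_py := by
  intro s quote _
  unfold Spec_quote_closed_py quote_closed_py quote_closed_py_alt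
  by_cases h : quote = "\""
  · subst h; simp [quote_eq_dquote]
  · rw [if_pos (by simpa using h), quote_ne_dquote quote h]
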